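-- pv_equiv track=rewrite | github.com/tnakaicode/jburkardt-python | subset/equiv1_next2.py | equiv1_next2
-- ===== SOURCE A (Python) =====
-- def equiv1_next2 ( n, a, done ):
--
-- #*****************************************************************************80
-- #
-- ## EQUIV1_NEXT2 computes, one at a time, the partitions of a set.
-- #
-- #  Discussion:
-- #
-- #    A partition of a set assigns each element to exactly one subset.
-- #
-- #    The number of partitions of a set of size N is the Bell number B(N).
-- #
-- #    The entries of IARRAY are the partition subset to which each
-- #    element of the original set belongs.  If there are NPART distinct
-- #    parts of the partition, then each entry of IARRAY will be a
-- #    number between 1 and NPART.  Every number from 1 to NPART will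
-- #    occur somewhere in the list.  If the entries of IARRAY are
-- #    examined in order, then each time a new partition subset occurs,
-- #    it will be the next unused integer.
-- #
-- #    For instance, for N = 4, the program will describe the set
-- #    where each element is in a separate subset as 1, 2, 3, 4,
-- #    even though such a partition might also be described as
-- #    4, 3, 2, 1 or even 1, 5, 8, 19.
-- #
-- #  Licensing:
-- #
-- #    This code is distributed under the GNU LGPL license.
-- #
-- #  Modified:
-- #
-- #    10 June 2015
-- #
-- #  Author:
-- #
-- #    John Burkardt
-- #
-- #  Parameters:
-- #
-- #    Input, integer N, the number of elements in the set.
-- #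
-- #    Input, integer A(N), the previous partition, that is, the output value
-- #    of A on the previous call.  On the first call, with DONE = TRUE,
-- #    the value of A is not needed.
-- #
-- #    Input, logical DONE, should be set to TRUE for the first call, to set
-- #    up initialization, and should be FALSE thereafter.
-- #
-- #    Output, integer A(N), the next partition.
-- #
-- #    Output, logical DONE, is TRUE if there are more partitions to generate.
-- #
--   if ( done ):
--
--     done = False
--     for i in range ( 0, n ):
--       a[i] = 1
--
--   else:
-- #
-- #  Find the last element J that can be increased by 1.
-- #  This is the element that is not equal to its maximum possible value,
-- #  which is the maximum value of all preceding elements +1.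
-- #
--     jmax = a[0]
--     imax = 0
--
--     for j in range ( 1, n ):
--
--       if ( jmax < a[j] ):
--         jmax = a[j]
--       else:
--         imax = j
-- #
-- #  If no element can be increased by 1, we are done.
-- #
--     if ( imax == 0 ):
--       done = True
--       return a, done
-- #
-- #  Increase the value of the IMAX-th element by 1, set its successors to 1.
-- #
--     done = False
--     a[imax] = a[imax] + 1
--     for j in range ( imax + 1, n ):
--       a[j] = 1
--
--   return a, done
-- ===== SOURCE B (Python) =====
-- def equiv1_next2(n, a, done):
--     if done:
--         for i in range(n):
--             a[i] = 1
--         return a, False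
--     # prefix-maximum table: pm[t] = max(a[0..t])
--     pm = []
--     m = None
--     for x in a[:n]:
--         m = x if (m is None or x > m) else m
--         pm.append(m)
--     # backward scan: first j (from the end) with a[j] <= max of its predecessors
--     pivot = 0
--     for j in range(n - 1, 0, -1):
--         if a[j] <= pm[j - 1]:
--             pivot = j
--             break
--     if pivot == 0:
--         return a, True
--     a[pivot] = a[pivot] + 1
--     for j in range(pivot + 1, n):
--         a[j] = 1
--     return a, False
-- ===== Notes on version B (the rewrite author's own statement) =====
-- stated objective: alternative
-- what changed: A finds the pivot with one forward pass that keeps a running maximum and overwrites the 'last eligible index'; B precomputes a prefix-maximum table in a forward pass and then scans backward from j=n-1, stopping at the first index with a[j] <= pm[j-1] (early break), keeping the init branch and the in-place (a, done) contract.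
import Mathlib
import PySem

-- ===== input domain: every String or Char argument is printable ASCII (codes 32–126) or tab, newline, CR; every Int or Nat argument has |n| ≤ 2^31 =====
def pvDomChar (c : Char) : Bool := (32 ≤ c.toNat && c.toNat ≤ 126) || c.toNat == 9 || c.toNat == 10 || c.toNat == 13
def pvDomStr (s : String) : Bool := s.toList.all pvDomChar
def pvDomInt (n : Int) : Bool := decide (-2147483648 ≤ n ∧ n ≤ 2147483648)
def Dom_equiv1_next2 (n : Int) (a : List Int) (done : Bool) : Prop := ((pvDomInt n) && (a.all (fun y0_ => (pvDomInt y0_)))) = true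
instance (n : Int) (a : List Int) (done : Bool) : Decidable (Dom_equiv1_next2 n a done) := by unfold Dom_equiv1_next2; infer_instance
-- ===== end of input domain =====

-- B changes how the pivot is found (prefix-maximum table + backward scan with break, vs A's
-- forward pass with a running max overwriting the last eligible index); both Pythons mutate `a`
-- in place identically, and the equivalence proved here is about the returned (a, done) value.

-- ===== PORT A =====
-- A's forward scan step: running maximum in .1, last non-increasing index in .2
def pvStepA (a : List Int) (p : Int × Int) (j : Int) : Int × Int :=
  if p.1 < PySem.List.pyGetD a j 0 then (PySem.List.pyGetD a j 0, p.2) else (p.1, j)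

def equiv1_next2 (n : Int) (a : List Int) (done : Bool) : List Int × Bool :=
  if done then
    ((PySem.List.pyRange 0 n 1).foldl (fun acc i => acc.set i.toNat 1) a, false)
  else
    let s := (PySem.List.pyRange 1 n 1).foldl (pvStepA a) (PySem.List.pyGetD a 0 0, 0)
    if s.2 = 0 then (a, true)
    else
      let a1 := a.set s.2.toNat (PySem.List.pyGetD a s.2 0 + 1)
      ((PySem.List.pyRange (s.2 + 1) n 1).foldl (fun acc j => acc.set j.toNat 1) a1, false)

-- ===== PORT B =====
-- B's prefix-maximum step: accumulated pm table in .1, current max (None before first element) in .2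
def pvStepB (p : List Int × Option Int) (x : Int) : List Int × Option Int :=
  let m := match p.2 with
    | none => x
    | some m0 => if m0 < x then x else m0
  (p.1 ++ [m], some m)

def equiv1_next2_alt (n : Int) (a : List Int) (done : Bool) : List Int × Bool :=
  if done then
    ((PySem.List.pyRange 0 n 1).foldl (fun acc i => acc.set i.toNat 1) a, false)
  else
    let pm := ((PySem.List.slice a (some 0) (some n)).foldl pvStepB ([], none)).1
    let pivot := ((PySem.List.pyRange (n - 1) 0 (-1)).find?
      (fun j => decide (PySem.List.pyGetD a j 0 ≤ PySem.List.pyGetD pm (j - 1) 0))).getD 0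
    if pivot = 0 then (a, true)
    else
      let a1 := a.set pivot.toNat (PySem.List.pyGetD a pivot 0 + 1)
      ((PySem.List.pyRange (pivot + 1) n 1).foldl (fun acc j => acc.set j.toNat 1) a1, false)

-- ===== PRECONDITION & SPEC =====
-- A indexes a[0..n-1]; it raises IndexError when n > len(a), and (with done=False) when a is empty.
def Pre_equiv1_next2 (n : Int) (a : List Int) (done : Bool) : Prop :=
  n ≤ a.length ∧ (done = false → a ≠ [])
instance (n : Int) (a : List Int) (done : Bool) : Decidable (Pre_equiv1_next2 n a done) := by
  unfold Pre_equiv1_next2; infer_instance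

def pvWitness_equiv1_next2 : Int × List Int × Bool := (3, [1, 1, 2], false)

def Spec_equiv1_next2 (n : Int) (a : List Int) (done : Bool) (out : List Int × Bool) : Prop := out = equiv1_next2_alt n a done
instance (n : Int) (a : List Int) (done : Bool) (out : List Int × Bool) : Decidable (Spec_equiv1_next2 n a done out) := by unfold Spec_equiv1_next2; infer_instance

-- ===== CLAIM (what is proved, stated in full; the proofs are below) =====
def Claim_equal_equiv1_next2 : Prop := ∀ (n : Int) (a : List Int) (done : Bool), Dom_equiv1_next2 n a done → Pre_equiv1_next2 n a done → Spec_equiv1_next2 n a done (equiv1_next2 n a done)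

-- ===== LEMMAS AND PROOFS =====

-- prefix maximum of a[0..t] (out-of-range reads default to 0, as the ports' pyGetD does)
def pvPf (a : List Int) : Nat → Int
  | 0 => a.getD 0 0
  | t+1 => max (pvPf a t) (a.getD (t+1) 0)

-- the pivot both programs compute: greatest j in [1,k] with a[j] ≤ max(a[0..j-1]), else 0
def pvBi (a : List Int) : Nat → Int
  | 0 => 0
  | k+1 => if a.getD (k+1) 0 ≤ pvPf a k then ((k : Int) + 1) else pvBi a k

-- spec-side prefix-max list
def pvPml (m : Int) : List Int → List Int
  | [] => []
  | x :: l => max m x :: pvPml (max m x) l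

theorem pvIfMax (m x : Int) : (if m < x then x else m) = max m x := by omega

theorem pvStepA_eq (a : List Int) (p : Int × Int) (j : Int) :
    pvStepA a p j = (max p.1 (PySem.List.pyGetD a j 0),
      if PySem.List.pyGetD a j 0 ≤ p.1 then j else p.2) := by
  unfold pvStepA
  rcases le_or_gt (PySem.List.pyGetD a j 0) p.1 with h | h
  · simp [not_lt.mpr h, h]
  · simp [h, not_le.mpr h, max_eq_right (le_of_lt h)]

theorem pvFoldA (a : List Int) (k : Nat) :
    (PySem.List.pyRange 1 ((k : Int) + 1) 1).foldl (pvStepA a) (PySem.List.pyGetD a 0 0, 0)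
      = (pvPf a k, pvBi a k) := by
  induction k with
  | zero =>
    rw [show ((0 : Nat) : Int) + 1 = 1 by simp, PySem.List.pyRange_one_eq_nil le_rfl]
    simp [pvPf, pvBi, PySem.List.pyGetD_ofNat']
  | succ k ih =>
    rw [show ((k + 1 : Nat) : Int) + 1 = ((k : Int) + 1) + 1 by push_cast; ring,
        PySem.List.pyRange_one_succ_right (by omega : (1 : Int) ≤ (k : Int) + 1),
        List.foldl_append, ih]
    simp only [List.foldl_cons, List.foldl_nil, pvStepA_eq]
    rw [show ((k : Int) + 1) = ((k + 1 : Nat) : Int) by push_cast; ring,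
        PySem.List.pyGetD_natCast]
    simp [pvPf, pvBi]

theorem pvFoldB_pm (l : List Int) (acc : List Int) (m : Int) :
    (l.foldl pvStepB (acc, some m)).1 = acc ++ pvPml m l := by
  induction l generalizing acc m with
  | nil => simp [pvPml]
  | cons x l ih => simp [pvStepB, pvIfMax, ih, pvPml]

theorem pvPml_getD (l : List Int) (m : Int) (t : Nat) (ht : t < l.length) :
    (pvPml m l).getD t 0 = (l.take (t + 1)).foldl max m := by
  induction l generalizing m t with
  | nil => simp at ht
  | cons x l ih =>
    cases t with
    | zero => simp [pvPml]
    | succ t => simp only [pvPml, List.getD_cons_succ, List.take_succ_cons, List.foldl_cons]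
                exact ih (max m x) t (by simpa using ht)

theorem pvPf_eq_fold (a : List Int) (t : Nat) (ht : t < a.length) :
    pvPf a t = (a.take (t + 1)).foldl max (a.getD 0 0) := by
  induction t with
  | zero =>
    cases a with
    | nil => simp at ht
    | cons x l => simp [pvPf]
  | succ t ih =>
    rw [List.take_add_one]
    have h1 : t < a.length := Nat.lt_of_succ_lt ht
    rw [List.foldl_append, ← ih h1]
    simp [pvPf, List.getD_eq_getElem?_getD,
      List.getElem?_eq_getElem ht]

theorem pvFindB (a pm : List Int) (N : Nat)
    (hpm : ∀ t : Nat, t < N → pm.getD t 0 = pvPf a t) :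
    ∀ k : Nat, k < N →
      (((PySem.List.pyRange (k : Int) 0 (-1)).find?
          (fun j => decide (PySem.List.pyGetD a j 0 ≤ PySem.List.pyGetD pm (j - 1) 0))).getD 0)
        = pvBi a k := by
  intro k
  induction k with
  | zero =>
    intro _
    rw [show ((0 : Nat) : Int) = 0 by simp, PySem.List.pyRange_neg_one_eq_nil le_rfl]
    simp [pvBi]
  | succ k ih =>
    intro hk
    rw [show ((k + 1 : Nat) : Int) = (k : Int) + 1 by push_cast; ring,
        PySem.List.pyRange_neg_one_cons (by omega : (0 : Int) < (k : Int) + 1)]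
    have hg : PySem.List.pyGetD a ((k : Int) + 1) 0 = a.getD (k + 1) 0 := by
      rw [show ((k : Int) + 1) = ((k + 1 : Nat) : Int) by push_cast; ring,
          PySem.List.pyGetD_natCast]
    have hg2 : PySem.List.pyGetD pm ((k : Nat) : Int) 0 = pvPf a k := by
      rw [PySem.List.pyGetD_natCast]; exact hpm k (by omega)
    have hp : decide (PySem.List.pyGetD a ((k : Int) + 1) 0
          ≤ PySem.List.pyGetD pm ((k : Int) + 1 - 1) 0)
        = decide (a.getD (k + 1) 0 ≤ pvPf a k) := by
      rw [show ((k : Int) + 1 - 1) = ((k : Nat) : Int) by push_cast; ring, hg, hg2]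
    by_cases hc : a.getD (k + 1) 0 ≤ pvPf a k
    · rw [List.find?_cons_of_pos (by rw [hp]; exact decide_eq_true hc)]
      simp only [pvBi, Option.getD_some, if_pos hc]
    · rw [List.find?_cons_of_neg (by rw [hp]; simpa using hc),
          show ((k : Int) + 1 - 1) = ((k : Nat) : Int) by push_cast; ring,
          ih (by omega)]
      simp only [pvBi, if_neg hc]

theorem pvPm_getD (x : Int) (l : List Int) (N : Nat) (hN1 : 1 ≤ N)
    (hNlen : N ≤ (x :: l).length) (t : Nat) (ht : t < N) :
    ((((x :: l).take N).foldl pvStepB ([], none)).1).getD t 0 = pvPf (x :: l) t := by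
  obtain ⟨M, rfl⟩ : ∃ M, N = M + 1 := ⟨N - 1, by omega⟩
  rw [List.take_succ_cons, List.foldl_cons,
      show pvStepB ([], none) x = ([x], some x) from rfl, pvFoldB_pm]
  have hx : ([x] ++ pvPml x (l.take M)) = pvPml x ((x :: l).take (M + 1)) := by
    rw [List.take_succ_cons]
    simp [pvPml]
  rw [hx, pvPml_getD _ _ _ (by
    simp only [List.length_take, List.length_cons] at hNlen ⊢; omega)]
  rw [List.take_take, show min (t + 1) (M + 1) = t + 1 by omega]
  rw [pvPf_eq_fold _ _ (by simp at hNlen ⊢; omega)]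
  rfl

-- ===== VERDICT (by name: the statement is the Claim_ definition above) =====
theorem equiv1_next2_spec : Claim_equal_equiv1_next2 := by
  intro n a done hdom hpre
  unfold Spec_equiv1_next2 equiv1_next2 equiv1_next2_alt
  cases done with
  | true => simp
  | false =>
    simp only [Bool.false_eq_true, if_false]
    rcases le_or_gt n 1 with hn | hn
    · rw [PySem.List.pyRange_one_eq_nil hn,
          PySem.List.pyRange_neg_one_eq_nil (by omega : n - 1 ≤ 0)]
      simp
    · obtain ⟨x, l, rfl⟩ := List.exists_cons_of_ne_nil (hpre.2 rfl)
      have hlen : n ≤ ((x :: l).length : Int) := hpre.1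
      set N := n.toNat with hN
      have hNn : (N : Int) = n := Int.toNat_of_nonneg (by omega)
      have hNlen : N ≤ (x :: l).length := by omega
      set k0 := N - 1 with hk0
      have hA := pvFoldA (x :: l) k0
      rw [show ((k0 : Nat) : Int) + 1 = n by omega] at hA
      have hsl : PySem.List.slice (x :: l) (some 0) (some n) = (x :: l).take N := by
        rw [PySem.List.slice_toNat (x :: l) (le_refl 0) (by omega : (0 : Int) ≤ n)]
        simp
        rw [hN]
      have hB := pvFindB (x :: l) _ N (fun t ht => pvPm_getD x l N (by omega) hNlen t ht)
        k0 (by omega)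
      rw [show ((k0 : Nat) : Int) = n - 1 by omega] at hB
      rw [hA, hsl, hB]
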